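-- pv_equiv track=rewrite | github.com/ashish086/practiceproblems | 3rddecember.py | longalpha
-- ===== SOURCE A (Python) =====
-- def longalpha(s):
--     if not s:
--         return ""
--
--     s_lower = s.lower()
--     b = current = s[0]
--
--     for i in range(1, len(s)):
--         if s_lower[i] > s_lower[i-1]:
--             current += s[i]
--         else:
--             if len(current) > len(b):
--                 b = current
--             current = s[i]
--
--     if len(current) > len(b):
--         b = current
--
--     return b
-- ===== SOURCE B (Python) =====
-- def longalpha(s):
--     # Two-pointer run scanner: for each run start i, advance j to the end of
--     # the maximal case-insensitively increasing run, keep the first longest run.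
--     lo = s.lower()
--     n = len(s)
--     best = ""
--     i = 0
--     while i < n:
--         j = i + 1
--         while j < n and lo[j] > lo[j - 1]:
--             j += 1
--         if j - i > len(best):
--             best = s[i:j]
--         i = j
--     return best
-- ===== Notes on version B (the rewrite author's own statement) =====
-- stated objective: alternative
-- what changed: Replaces A's single pass that grows a run string and a best-so-far inside one for-loop by a two-pointer scanner: an inner while locates the end of each maximal increasing run and the run is taken as one slice s[i:j], compared by length against the best.
import Mathlib
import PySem

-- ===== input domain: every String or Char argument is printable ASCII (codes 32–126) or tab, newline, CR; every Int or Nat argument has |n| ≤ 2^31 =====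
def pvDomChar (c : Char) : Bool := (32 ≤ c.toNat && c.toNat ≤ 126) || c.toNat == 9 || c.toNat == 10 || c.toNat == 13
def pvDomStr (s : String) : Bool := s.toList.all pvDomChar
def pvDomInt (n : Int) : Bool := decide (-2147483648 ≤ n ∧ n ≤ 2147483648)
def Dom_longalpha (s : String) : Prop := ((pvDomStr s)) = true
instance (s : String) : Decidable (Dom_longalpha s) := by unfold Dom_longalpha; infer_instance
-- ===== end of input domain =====

-- B replaces A's one-pass best/current fold by a two-pointer run scanner (inner scan to each
-- run's end, whole run compared at once); objective: alternative structure, same exact result.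

-- shared one-step "keep the longer, first on ties" (Python's `if len(new) > len(best): best = new`)
def maxByLen (b c : List Char) : List Char := if b.length < c.length then c else b

-- ===== PORT A =====
-- A's for-loop over i in range(1, len(s)); `s_lower[i] > s_lower[i-1]` is ported per character
-- (str.lower is character-wise, PySem.Chars.lowerChar): the loop walks the tail carrying the
-- previous character, the growing run and the best so far.
def longalphaLoop (prev : Char) (b cur : List Char) : List Char → List Char
  | [] => maxByLen b cur
  | y :: ys =>
    if PySem.Chars.lowerChar prev < PySem.Chars.lowerChar y then
      longalphaLoop y b (cur ++ [y]) ys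
    else
      longalphaLoop y (maxByLen b cur) [y] ys

def longalpha (s : String) : String :=
  match s.toList with
  | [] => ""
  | x :: xs => String.ofList (longalphaLoop x [x] [x] xs)

-- ===== PORT B =====
-- Source B's inner `while j < n and lo[j] > lo[j-1]` ported structurally: it returns the scanned
-- rest of the run together with the remainder (the slice s[i:j] becomes the run built directly).
def splitRunB (prev : Char) : List Char → List Char × List Char
  | [] => ([], [])
  | y :: ys =>
    if PySem.Chars.lowerChar prev < PySem.Chars.lowerChar y then
      let p := splitRunB y ys
      (y :: p.1, p.2)
    else ([], y :: ys)

theorem splitRunB_snd_length (prev : Char) (ys : List Char) :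
    (splitRunB prev ys).2.length ≤ ys.length := by
  induction ys generalizing prev with
  | nil => simp [splitRunB]
  | cons y ys ih =>
    simp only [splitRunB]
    split
    · exact le_trans (ih y) (Nat.le_succ _)
    · simp

-- Source B's outer while loop: i < n ↦ nonempty remainder x :: xs, j := end of the run from i.
def longalphaOuter (best : List Char) : List Char → List Char
  | [] => best
  | x :: xs =>
    let p := splitRunB x xs
    longalphaOuter (maxByLen best (x :: p.1)) p.2
termination_by l => l.length
decreasing_by exact Nat.lt_succ_of_le (splitRunB_snd_length x xs)

def longalpha_alt (s : String) : String := String.ofList (longalphaOuter [] s.toList)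

-- ===== PRECONDITION & SPEC =====
def Spec_longalpha (s : String) (out : String) : Prop := out = longalpha_alt s
instance (s : String) (out : String) : Decidable (Spec_longalpha s out) := by unfold Spec_longalpha; infer_instance

-- ===== CLAIM (what is proved, stated in full; the proofs are below) =====
def Claim_equal_longalpha : Prop := ∀ (s : String), Dom_longalpha s → Spec_longalpha s (longalpha s)

-- ===== LEMMAS AND PROOFS =====

-- A's loop, started with run-so-far `cur` after `prev`, first extends `cur` by the rest of the
-- current run (splitRunB), folds it into the best, and then behaves exactly like B's outer loop.
theorem loop_eq_outer (ys : List Char) : ∀ (prev : Char) (b cur : List Char),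
    longalphaLoop prev b cur ys =
      longalphaOuter (maxByLen b (cur ++ (splitRunB prev ys).1)) (splitRunB prev ys).2 := by
  induction ys with
  | nil => intro prev b cur; simp [longalphaLoop, splitRunB, longalphaOuter]
  | cons y ys ih =>
    intro prev b cur
    by_cases h : PySem.Chars.lowerChar prev < PySem.Chars.lowerChar y
    · simp only [longalphaLoop, splitRunB, if_pos h]
      rw [ih]
      simp
    · simp only [longalphaLoop, splitRunB, if_neg h]
      rw [ih]
      conv_rhs => rw [longalphaOuter]
      simp [maxByLen]

theorem maxByLen_single (x : Char) (r : List Char) :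
    maxByLen [x] (x :: r) = maxByLen [] (x :: r) := by
  cases r <;> simp [maxByLen]

-- ===== VERDICT (by name: the statement is the Claim_ definition above) =====
theorem longalpha_spec : Claim_equal_longalpha := by
  intro s _
  unfold Spec_longalpha longalpha longalpha_alt
  cases hl : s.toList with
  | nil => dsimp only; rw [longalphaOuter]
  | cons x xs =>
    dsimp only
    rw [loop_eq_outer]
    conv_rhs => rw [longalphaOuter]
    rw [← maxByLen_single]
    rfl
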